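-- pv_equiv track=rewrite | github.com/epyeoh/clear-linux-dissector-web | dockersetup.py | yaml_uncomment
-- ===== SOURCE A (Python) =====
-- def yaml_uncomment(line):
--     out = ''
--     for i, ch in enumerate(line):
--         if ch == ' ':
--             out += ch
--         elif ch != '#':
--             out += line[i:]
--             break
--     return out
-- ===== SOURCE B (Python) =====
-- def yaml_uncomment(line):
--     rest = line.lstrip(' #')
--     prefix = line[:len(line) - len(rest)]
--     return prefix.replace('#', '') + rest
-- ===== Notes on version B (the rewrite author's own statement) =====
-- stated objective: idiomatic
-- what changed: B replaces A's per-character accumulate-and-break loop with a loop-free idiom: lstrip(' #') finds the boundary of the leading space/hash run, then the '#' are dropped from that prefix with str.replace and the untouched remainder is appended.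
import Mathlib
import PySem

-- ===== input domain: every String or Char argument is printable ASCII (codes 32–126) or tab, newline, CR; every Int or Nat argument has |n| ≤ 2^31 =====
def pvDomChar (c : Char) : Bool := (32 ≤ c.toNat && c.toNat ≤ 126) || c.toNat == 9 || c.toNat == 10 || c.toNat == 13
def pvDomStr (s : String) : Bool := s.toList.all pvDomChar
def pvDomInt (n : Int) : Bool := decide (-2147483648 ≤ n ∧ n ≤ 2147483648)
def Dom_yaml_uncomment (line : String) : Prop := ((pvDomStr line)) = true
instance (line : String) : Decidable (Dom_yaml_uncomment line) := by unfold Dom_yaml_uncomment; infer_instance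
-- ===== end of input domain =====

-- B uncomments the line with lstrip(' #') + replace on the prefix instead of A's per-character loop (idiomatic; same result).

-- ===== PORT A =====
-- A's loop: spaces are copied, '#' is skipped, and at the first other character the rest of the line is appended and the loop breaks.
def yamlUncommentGo : List Char → List Char → List Char
  | out, [] => out
  | out, c :: rest =>
    if c = ' ' then yamlUncommentGo (out ++ [c]) rest
    else if c ≠ '#' then out ++ (c :: rest)
    else yamlUncommentGo out rest

def yaml_uncomment (line : String) : String :=
  String.mk (yamlUncommentGo [] line.toList)

-- ===== PORT B =====
def yaml_uncomment_alt (line : String) : String :=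
  let cs := line.toList
  let rest := cs.dropWhile (fun c => c == ' ' || c == '#')   -- line.lstrip(' #'), exact hand port of left-strip over the char set
  let pre := cs.take (cs.length - rest.length)               -- line[:len(line) - len(rest)]
  String.mk (PySem.Chars.replace pre ['#'] [] ++ rest)       -- prefix.replace('#', '') + rest

-- ===== PRECONDITION & SPEC =====
def Spec_yaml_uncomment (line : String) (out : String) : Prop := out = yaml_uncomment_alt line
instance (line : String) (out : String) : Decidable (Spec_yaml_uncomment line out) := by unfold Spec_yaml_uncomment; infer_instance

-- ===== CLAIM (what is proved, stated in full; the proofs are below) =====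
def Claim_equal_yaml_uncomment : Prop := ∀ (line : String), Dom_yaml_uncomment line → Spec_yaml_uncomment line (yaml_uncomment line)

-- ===== LEMMAS AND PROOFS =====

-- replace with old = "#", new = "" filters out the '#' characters (enough fuel)
theorem replace_hash_go (l : List Char) : ∀ (fuel : Nat) (acc : List Char), l.length ≤ fuel →
    PySem.Chars.replace.go ['#'] [] fuel l acc = acc.reverse ++ l.filter (fun c => !(c == '#')) := by
  induction l with
  | nil => intro fuel acc _; cases fuel <;> simp [PySem.Chars.replace.go]
  | cons c t ih =>
    intro fuel acc hf
    cases fuel with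
    | zero => simp at hf
    | succ n =>
      by_cases hc : c = '#'
      · subst hc
        simp only [PySem.Chars.replace.go, List.isPrefixOf, List.isPrefixOf_cons₂_self]
        simpa using ih n acc (by simpa using hf)
      · have hpre : List.isPrefixOf ['#'] (c :: t) = false := by
          have : ('#' == c) = false := beq_eq_false_iff_ne.mpr (fun h => hc h.symm)
          simp [List.isPrefixOf, this]
        simp only [PySem.Chars.replace.go, hpre]
        rw [if_neg (by simp)]
        rw [ih n (c :: acc) (by simpa using hf)]
        simp [hc]

theorem replace_hash (l : List Char) :
    PySem.Chars.replace l ['#'] [] = l.filter (fun c => !(c == '#')) := by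
  simp only [PySem.Chars.replace, List.isEmpty]
  rw [replace_hash_go l l.length [] le_rfl]
  simp

-- the loop of A computes: filtered leading run of spaces/hashes, then the untouched remainder
theorem yamlUncommentGo_eq (cs : List Char) : ∀ (out : List Char),
    yamlUncommentGo out cs =
      out ++ (cs.takeWhile (fun c => c == ' ' || c == '#')).filter (fun c => !(c == '#'))
          ++ cs.dropWhile (fun c => c == ' ' || c == '#') := by
  induction cs with
  | nil => intro out; simp [yamlUncommentGo]
  | cons c t ih =>
    intro out
    by_cases hsp : c = ' '
    · subst hsp
      simp only [yamlUncommentGo, if_pos rfl]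
      rw [ih]
      simp [List.takeWhile_cons, List.dropWhile_cons]
    · by_cases hh : c = '#'
      · subst hh
        simp only [yamlUncommentGo]
        rw [if_neg (by decide), if_neg (by simp)]
        rw [ih]
        simp [List.takeWhile_cons, List.dropWhile_cons]
      · simp only [yamlUncommentGo, if_neg hsp, if_pos hh]
        simp [List.takeWhile_cons, List.dropWhile_cons, hsp, hh]

theorem take_sub_dropWhile (cs : List Char) (p : Char → Bool) :
    cs.take (cs.length - (cs.dropWhile p).length) = cs.takeWhile p := by
  have hsum : cs.length = (cs.takeWhile p).length + (cs.dropWhile p).length := by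
    conv_lhs => rw [← List.takeWhile_append_dropWhile (p := p) (l := cs)]
    rw [List.length_append]
  have h : cs.length - (cs.dropWhile p).length = (cs.takeWhile p).length := by omega
  rw [h, ← List.prefix_iff_eq_take.mp (List.takeWhile_prefix p)]

-- ===== VERDICT (by name: the statement is the Claim_ definition above) =====
theorem yaml_uncomment_spec : Claim_equal_yaml_uncomment := by
  intro line _
  show yaml_uncomment line = yaml_uncomment_alt line
  unfold yaml_uncomment yaml_uncomment_alt
  dsimp only
  rw [yamlUncommentGo_eq, take_sub_dropWhile, replace_hash]
  simp
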